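-- pv_equiv track=rewrite | github.com/yashwarrdhangautam/Netra | netra/ai_brain/attack_chain.py | _build_mitre_sequence
-- ===== SOURCE A (Python) =====
-- from typing import Dict, List, Optional, Set, Tuple
--
-- MITRE_PHASE_ORDER = [
--     "reconnaissance",   # T1590-T1598
--     "initial_access",   # T1133, T1190, T1195
--     "execution",        # T1059
--     "persistence",      # T1078, T1098
--     "privilege_esc",    # T1068, T1134
--     "lateral_move",     # T1021, T1570
--     "collection",       # T1005, T1039
--     "exfiltration",     # T1041, T1048
--     "impact",           # T1485, T1486
-- ]
--
-- TECHNIQUE_TO_PHASE: Dict[str, str] = {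
--     "T1190": "initial_access",     # Exploit Public-Facing Application
--     "T1133": "initial_access",     # External Remote Services
--     "T1195": "initial_access",     # Supply Chain Compromise
--     "T1059": "execution",          # Command and Scripting Interpreter
--     "T1078": "persistence",        # Valid Accounts
--     "T1098": "persistence",        # Account Manipulation
--     "T1068": "privilege_esc",      # Exploitation for Privilege Escalation
--     "T1134": "privilege_esc",      # Access Token Manipulation
--     "T1021": "lateral_move",       # Remote Services
--     "T1005": "collection",         # Data from Local System
--     "T1041": "exfiltration",       # Exfiltration Over C2 Channel
--     "T1485": "impact",             # Data Destruction
--     "T1486": "impact",             # Data Encrypted for Impact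
--     "T1110": "initial_access",     # Brute Force
--     "T1552": "collection",         # Unsecured Credentials
--     "T1083": "collection",         # File and Directory Discovery
--     "T1557": "collection",         # Adversary-in-the-Middle
-- }
--
-- def _build_mitre_sequence(path: List[dict]) -> str:
--     """
--     Map chain findings to MITRE ATT&CK techniques and order by attack phase.
--
--     Args:
--         path: Ordered list of finding dicts.
--
--     Returns:
--         String like "T1190 → T1059 → T1078".
--     """
--     techniques: List[Tuple[str, str]] = []  # (phase, technique_id)
--
--     for f in path:
--         t = (f.get("mitre_technique") or "").strip()
--         if t and t.startswith("T"):
--             tid   = t.split(",")[0].strip()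
--             phase = TECHNIQUE_TO_PHASE.get(tid, "unknown")
--             techniques.append((phase, tid))
--
--     if not techniques:
--         return "Unknown Sequence"
--
--     # Sort by phase order
--     def phase_key(item: Tuple[str, str]) -> int:
--         """Return sort key for MITRE phase ordering."""
--         ph = item[0]
--         try:
--             return MITRE_PHASE_ORDER.index(ph)
--         except ValueError:
--             return 999
--
--     techniques.sort(key=phase_key)
--     return " → ".join(t[1] for t in techniques)
-- ===== SOURCE B (Python) =====
-- from typing import Dict, List
--
-- MITRE_PHASE_ORDER = [
--     "reconnaissance",
--     "initial_access",
--     "execution",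
--     "persistence",
--     "privilege_esc",
--     "lateral_move",
--     "collection",
--     "exfiltration",
--     "impact",
-- ]
--
-- TECHNIQUE_TO_PHASE: Dict[str, str] = {
--     "T1190": "initial_access",
--     "T1133": "initial_access",
--     "T1195": "initial_access",
--     "T1059": "execution",
--     "T1078": "persistence",
--     "T1098": "persistence",
--     "T1068": "privilege_esc",
--     "T1134": "privilege_esc",
--     "T1021": "lateral_move",
--     "T1005": "collection",
--     "T1041": "exfiltration",
--     "T1485": "impact",
--     "T1486": "impact",
--     "T1110": "initial_access",
--     "T1552": "collection",
--     "T1083": "collection",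
--     "T1557": "collection",
-- }
--
-- def _build_mitre_sequence(path: List[dict]) -> str:
--     """No sort and no (phase, tid) pairs: extract the technique ids once, then
--     emit them by making one pass over the ids per MITRE phase (staged selection),
--     with ids of unknown techniques appended last."""
--     tids = []
--     for f in path:
--         t = (f.get("mitre_technique") or "").strip()
--         if t.startswith("T"):
--             tids.append(t.split(",")[0].strip())
--     if not tids:
--         return "Unknown Sequence"
--     parts: List[str] = []
--     for ph in MITRE_PHASE_ORDER:
--         parts.extend(tid for tid in tids if TECHNIQUE_TO_PHASE.get(tid) == ph)
--     parts.extend(tid for tid in tids if tid not in TECHNIQUE_TO_PHASE)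
--     return " → ".join(parts)
-- ===== Notes on version B (the rewrite author's own statement) =====
-- stated objective: alternative
-- what changed: Replaces the (phase, tid)-pair extraction plus stable sort by phase_key with a plain tid list emitted by one selection pass per MITRE phase in phase order, unknown-technique ids appended last, so no sort and no repeated MITRE_PHASE_ORDER.index scans.
import Mathlib
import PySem

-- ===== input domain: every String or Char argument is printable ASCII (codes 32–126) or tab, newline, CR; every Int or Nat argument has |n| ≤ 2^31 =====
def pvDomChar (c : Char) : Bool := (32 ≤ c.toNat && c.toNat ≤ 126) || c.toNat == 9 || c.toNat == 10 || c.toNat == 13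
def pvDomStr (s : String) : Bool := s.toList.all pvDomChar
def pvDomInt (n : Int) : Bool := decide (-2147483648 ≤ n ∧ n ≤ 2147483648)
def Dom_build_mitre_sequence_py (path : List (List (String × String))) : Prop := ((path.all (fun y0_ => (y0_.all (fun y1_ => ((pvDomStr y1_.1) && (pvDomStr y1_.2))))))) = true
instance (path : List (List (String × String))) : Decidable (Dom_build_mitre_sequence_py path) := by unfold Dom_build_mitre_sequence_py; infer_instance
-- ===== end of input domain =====

-- B drops the (phase, tid) pairs and the stable sort by phase_key: it extracts the plain
-- tid list once and makes one selection pass over it per MITRE phase, unknown ids last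
-- (objective: alternative — no sort at all).

-- ===== PORT A =====
-- shared module constants (identical lines in Source A and Source B)
def pvPhases : List String :=
  ["reconnaissance", "initial_access", "execution", "persistence", "privilege_esc",
   "lateral_move", "collection", "exfiltration", "impact"]

def pvTechniqueToPhase : PySem.Dict String String := PySem.Dict.mk
  [("T1190", "initial_access"), ("T1133", "initial_access"), ("T1195", "initial_access"),
   ("T1059", "execution"), ("T1078", "persistence"), ("T1098", "persistence"),
   ("T1068", "privilege_esc"), ("T1134", "privilege_esc"), ("T1021", "lateral_move"),
   ("T1005", "collection"), ("T1041", "exfiltration"), ("T1485", "impact"),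
   ("T1486", "impact"), ("T1110", "initial_access"), ("T1552", "collection"),
   ("T1083", "collection"), ("T1557", "collection")]

-- A's loop body: t = (f.get("mitre_technique") or "").strip();
-- if t and t.startswith("T"): tid = t.split(",")[0].strip(); phase = TECHNIQUE_TO_PHASE.get(tid, "unknown").
-- f.get(k) or "" is getD k "" ('or ""' maps only a missing key / empty value to "", which getD "" does);
-- t.split(",")[0] never raises: sep "," ≠ "" so split? is a some of a nonempty list (headD "" is exact).
def pvExtract (f : List (String × String)) : Option (String × String) :=
  let t := PySem.Str.strip ((PySem.Dict.mk f).getD "mitre_technique" "")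
  if (!(t == "") && PySem.Str.startswith t "T") then
    let tid := PySem.Str.strip (((PySem.Str.split? t ",").getD []).headD "")
    some (pvTechniqueToPhase.getD tid "unknown", tid)
  else none

-- phase_key: MITRE_PHASE_ORDER.index(ph); 999 when .index raises ValueError (= index? none)
def pvPhaseKey (item : String × String) : Int :=
  match PySem.List.index? pvPhases item.1 with
  | some i => (i : Int)
  | none => 999

def build_mitre_sequence_py (path : List (List (String × String))) : String :=
  let techniques : List (String × String) :=
    path.foldl (fun acc f =>
      match pvExtract f with
      | some pt => acc ++ [pt]
      | none => acc) []
  if techniques = [] then "Unknown Sequence"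
  else PySem.Str.join " → " ((PySem.List.sorted techniques pvPhaseKey false).map (·.2))

-- ===== PORT B =====
-- B keeps only the tid: same strip/startswith/split filter (empty t cannot start with "T",
-- so Source B drops A's redundant 't and'), no phase stored.
def pvTid? (f : List (String × String)) : Option String :=
  let t := PySem.Str.strip ((PySem.Dict.mk f).getD "mitre_technique" "")
  if PySem.Str.startswith t "T" then
    some (PySem.Str.strip (((PySem.Str.split? t ",").getD []).headD ""))
  else none

-- one selection pass per phase ('parts.extend(tid for tid in tids if …)'), unknown ids
-- ('tid not in TECHNIQUE_TO_PHASE') appended last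
def build_mitre_sequence_py_alt (path : List (List (String × String))) : String :=
  let tids : List String := path.filterMap pvTid?
  if tids = [] then "Unknown Sequence"
  else
    let parts : List String :=
      (pvPhases.foldl (fun acc ph =>
          acc ++ tids.filter (fun tid => pvTechniqueToPhase.get? tid == some ph)) [])
        ++ tids.filter (fun tid => !(pvTechniqueToPhase.get? tid).isSome)
    PySem.Str.join " → " parts

-- ===== PRECONDITION & SPEC =====
def Spec_build_mitre_sequence_py (path : List (List (String × String))) (out : String) : Prop := out = build_mitre_sequence_py_alt path
instance (path : List (List (String × String))) (out : String) : Decidable (Spec_build_mitre_sequence_py path out) := by unfold Spec_build_mitre_sequence_py; infer_instance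

-- ===== CLAIM (what is proved, stated in full; the proofs are below) =====
def Claim_equal_build_mitre_sequence_py : Prop := ∀ (path : List (List (String × String))), Dom_build_mitre_sequence_py path → Spec_build_mitre_sequence_py path (build_mitre_sequence_py path)

-- ===== LEMMAS AND PROOFS =====

-- phase_key as a function of the phase string alone
def pvKey (ph : String) : Int :=
  match PySem.List.index? pvPhases ph with
  | some i => (i : Int)
  | none => 999

theorem pvPhaseKey_eq : pvPhaseKey = fun p : String × String => pvKey p.1 := rfl

-- A's extraction is B's extraction tagged with the phase
def pvTag (tid : String) : String × String := (pvTechniqueToPhase.getD tid "unknown", tid)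

theorem pvExtract_eq (f : List (String × String)) :
    pvExtract f = (pvTid? f).map pvTag := by
  unfold pvExtract pvTid? pvTag
  by_cases h : PySem.Str.strip ((PySem.Dict.mk f).getD "mitre_technique" "") = ""
  · simp [h]
    decide
  · simp [h]

-- A's accumulation loop collects exactly filterMap pvExtract
theorem foldlA_eq : ∀ (path : List (List (String × String))) (acc : List (String × String)),
    path.foldl (fun acc f =>
      match pvExtract f with
      | some pt => acc ++ [pt]
      | none => acc) acc = acc ++ path.filterMap pvExtract := by
  intro path
  induction path with
  | nil => simp
  | cons f path ih => intro acc; cases hf : pvExtract f <;> simp [hf, ih]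

-- stable insertion: x lands after everything with key ≤ key x and before everything larger
theorem insertBy_middle {α : Type} (key : α → Int) (x : α) :
    ∀ (pre post : List α), (∀ y ∈ pre, ¬ key x < key y) → (∀ y ∈ post, key x < key y) →
      PySem.List.insertBy (fun a b => decide (key a < key b)) x (pre ++ post)
        = pre ++ x :: post := by
  intro pre
  induction pre with
  | nil =>
    intro post _ h2
    cases post with
    | nil => simp [PySem.List.insertBy]
    | cons y ys =>
      have hy := h2 y (by simp)
      rw [List.nil_append, PySem.List.insertBy]
      simp [hy]
  | cons y pre ih =>
    intro post h1 h2
    have hy : ¬ key x < key y := h1 y (by simp)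
    rw [List.cons_append, PySem.List.insertBy]
    simp only [decide_eq_true_eq, hy, if_false]
    rw [List.cons_append, ih post (fun z hz => h1 z (by simp [hz])) h2]

-- a stable sort whose key factors through f equals the concatenation of the f-buckets
-- taken in strictly key-increasing bucket order
theorem sorted_buckets {α K : Type} [DecidableEq K] [BEq K] [LawfulBEq K]
    (key : K → Int) (f : α → K) (ks : List K)
    (hks : ks.Pairwise (fun a b => key a < key b)) :
    ∀ (l : List α), (∀ p ∈ l, f p ∈ ks) →
      PySem.List.sorted l (fun x => key (f x)) false
        = ks.flatMap (fun k => l.filter (fun x => f x == k)) := by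
  intro l
  induction l using List.reverseRecOn with
  | nil => simp [PySem.List.sorted_eq_foldl_insertBy]
  | append_singleton l x ih =>
    intro hl
    have hx : f x ∈ ks := hl x (by simp)
    have hl' : ∀ p ∈ l, f p ∈ ks := fun p hp => hl p (by simp [hp])
    rw [PySem.List.sorted_eq_foldl_insertBy, List.foldl_append,
        ← PySem.List.sorted_eq_foldl_insertBy, ih hl']
    obtain ⟨ks1, ks2, rfl⟩ := List.append_of_mem hx
    have hsplit := List.pairwise_append.mp hks
    have h1 : ∀ a ∈ ks1, key a < key (f x) := fun a ha => hsplit.2.2 a ha (f x) (by simp)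
    have h2 : ∀ b ∈ ks2, key (f x) < key b := (List.pairwise_cons.mp hsplit.2.1).1
    have hmid := insertBy_middle (fun y => key (f y)) x
      (ks1.flatMap (fun k => l.filter (fun y => f y == k)) ++ l.filter (fun y => f y == f x))
      (ks2.flatMap (fun k => l.filter (fun y => f y == k)))
      (by
        intro y hy
        show ¬ key (f x) < key (f y)
        rcases List.mem_append.mp hy with hy | hy
        · obtain ⟨k, hk, hyk⟩ := List.mem_flatMap.mp hy
          have hfy : f y = k := by simpa using (List.mem_filter.mp hyk).2
          have := h1 k hk
          rw [hfy]; omega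
        · have hfy : f y = f x := by simpa using (List.mem_filter.mp hy).2
          rw [hfy]; omega)
      (by
        intro y hy
        show key (f x) < key (f y)
        obtain ⟨k, hk, hyk⟩ := List.mem_flatMap.mp hy
        have hfy : f y = k := by simpa using (List.mem_filter.mp hyk).2
        have := h2 k hk
        rw [hfy]; omega)
    have e1 : ks1.flatMap (fun k => (l ++ [x]).filter (fun y => f y == k))
        = ks1.flatMap (fun k => l.filter (fun y => f y == k)) := by
      rw [List.flatMap_def, List.flatMap_def]
      congr 1
      apply List.map_congr_left
      intro k hk
      have hne : ¬ (f x == k) = true := by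
        have := h1 k hk
        simp only [beq_iff_eq]
        intro h; rw [h] at this; omega
      simp [List.filter_append, hne]
    have e2 : ks2.flatMap (fun k => (l ++ [x]).filter (fun y => f y == k))
        = ks2.flatMap (fun k => l.filter (fun y => f y == k)) := by
      rw [List.flatMap_def, List.flatMap_def]
      congr 1
      apply List.map_congr_left
      intro k hk
      have hne : ¬ (f x == k) = true := by
        have := h2 k hk
        simp only [beq_iff_eq]
        intro h; rw [h] at this; omega
      simp [List.filter_append, hne]
    have e4 : (l ++ [x]).filter (fun y => f y == f x)
        = l.filter (fun y => f y == f x) ++ [x] := by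
      simp [List.filter_append]
    simp only [List.foldl_cons, List.foldl_nil, List.flatMap_append, List.flatMap_cons]
    rw [e1, e2, e4]
    simp only [List.append_assoc, List.singleton_append] at hmid ⊢
    exact hmid

-- a value the dict literal returns is one of its stored values
theorem get?_mk_mem_snd {κ ν : Type} [BEq κ] :
    ∀ (ps : List (κ × ν)) (k : κ) (v : ν),
      (PySem.Dict.mk ps).get? k = some v → v ∈ ps.map (·.2) := by
  intro ps
  induction ps with
  | nil => intro k v h; simp [PySem.Dict.get?] at h
  | cons p ps ih =>
    obtain ⟨k0, v0⟩ := p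
    intro k v h
    rw [PySem.Dict.get?_mk_cons] at h
    by_cases hk : (k0 == k) = true
    · simp [hk] at h; simp [← h]
    · simp [hk] at h; simp [ih k v h]

-- the technique table never stores the sentinel "unknown"
theorem get?_ne_unknown (tid : String) : pvTechniqueToPhase.get? tid ≠ some "unknown" := by
  intro h
  have hv := get?_mk_mem_snd _ _ _ h
  revert hv; decide

-- getD-with-sentinel vs get? correspondence for a real phase …
theorem tag_eq_phase (ph : String) (hph : ph ∈ pvPhases) (tid : String) :
    ((pvTag tid).1 == ph) = (pvTechniqueToPhase.get? tid == some ph) := by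
  unfold pvTag
  rw [PySem.Dict.getD_eq_get?_getD]
  cases hg : pvTechniqueToPhase.get? tid with
  | none =>
    have hne : ¬ ("unknown" : String) = ph := by
      intro h; rw [← h] at hph; revert hph; decide
    simp [Option.getD, hne]
  | some v => simp [Option.getD]

-- … and for the unknown bucket
theorem tag_eq_unknown (tid : String) :
    ((pvTag tid).1 == "unknown") = (!(pvTechniqueToPhase.get? tid).isSome) := by
  unfold pvTag
  rw [PySem.Dict.getD_eq_get?_getD]
  cases hg : pvTechniqueToPhase.get? tid with
  | none => simp [Option.getD]
  | some v =>
    have := get?_ne_unknown tid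
    rw [hg] at this
    simp only [Option.getD, Option.isSome_some, Bool.not_true, beq_eq_false_iff_ne, ne_eq]
    intro h; exact this (by rw [h])

-- every phase A emits lies in pvPhases ++ ["unknown"]
theorem pvTag_fst (tid : String) : (pvTag tid).1 ∈ pvPhases ++ ["unknown"] := by
  unfold pvTag
  rw [PySem.Dict.getD_eq_get?_getD]
  cases hg : pvTechniqueToPhase.get? tid with
  | none => simp [Option.getD]
  | some v =>
    have hv := get?_mk_mem_snd _ _ _ hg
    have hall : ∀ w ∈ ([("T1190", "initial_access"), ("T1133", "initial_access"), ("T1195", "initial_access"),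
      ("T1059", "execution"), ("T1078", "persistence"), ("T1098", "persistence"),
      ("T1068", "privilege_esc"), ("T1134", "privilege_esc"), ("T1021", "lateral_move"),
      ("T1005", "collection"), ("T1041", "exfiltration"), ("T1485", "impact"),
      ("T1486", "impact"), ("T1110", "initial_access"), ("T1552", "collection"),
      ("T1083", "collection"), ("T1557", "collection")] : List (String × String)).map (·.2),
        w ∈ pvPhases ++ ["unknown"] := by decide
    simpa [Option.getD] using hall v hv

-- ===== VERDICT (by name: the statement is the Claim_ definition above) =====
theorem build_mitre_sequence_py_spec : Claim_equal_build_mitre_sequence_py := by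
  intro path _
  unfold Spec_build_mitre_sequence_py build_mitre_sequence_py build_mitre_sequence_py_alt
  simp only [foldlA_eq, List.nil_append]
  have htechs : path.filterMap pvExtract = (path.filterMap pvTid?).map pvTag := by
    rw [← List.filterMap_eq_map, List.filterMap_filterMap]
    apply List.filterMap_congr
    intro f _
    rw [pvExtract_eq]
    cases pvTid? f <;> rfl
  rw [htechs]
  set tids := path.filterMap pvTid? with htids
  by_cases hT : tids = []
  · simp [hT]
  · rw [if_neg (by simp [hT]), if_neg hT]
    congr 1
    rw [pvPhaseKey_eq,
        sorted_buckets pvKey (fun p : String × String => p.1) (pvPhases ++ ["unknown"])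
          (by decide) (tids.map pvTag)
          (fun p hp => by
            obtain ⟨tid, _, rfl⟩ := List.mem_map.mp hp
            exact pvTag_fst tid)]
    rw [PySem.List.foldl_append_eq_flatMap, List.nil_append,
        List.flatMap_append, List.flatMap_singleton, List.map_append]
    congr 1
    · rw [List.map_flatMap, List.flatMap_def, List.flatMap_def]
      congr 1
      apply List.map_congr_left
      intro ph hph
      rw [List.filter_map, List.map_map]
      have : (fun p : String × String => p.1 == ph) ∘ pvTag
          = fun tid => pvTechniqueToPhase.get? tid == some ph := by
        funext tid; exact tag_eq_phase ph hph tid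
      rw [this]
      simp [Function.comp_def, pvTag]
    · rw [List.filter_map, List.map_map]
      have : (fun p : String × String => p.1 == "unknown") ∘ pvTag
          = fun tid => !(pvTechniqueToPhase.get? tid).isSome := by
        funext tid; exact tag_eq_unknown tid
      rw [this]
      simp [Function.comp_def, pvTag]
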